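-- pv_equiv track=rewrite | github.com/gudals-kim/Studyroom | 프로그래머스/unrated/152996. 시소 짝꿍/시소 짝꿍.py | solution
-- ===== SOURCE A (Python) =====
-- def solution(weights):
--     same = [-1]*1001
--     visit = [-1]*4001
--     answer = 0
--     for idx in range(len(weights)):
--         same[weights[idx]]+=1
--         answer += same[weights[idx]]
--         sameCnt = same[weights[idx]]
--
--         for dist in range(2,5):
--             visit[weights[idx]*dist] += 1
--             answer += (visit[weights[idx]*dist]-sameCnt)
--
--     return answer
-- ===== SOURCE B (Python) =====
-- def solution(weights):
--     seen = {}
--     answer = 0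
--     for w in weights:
--         answer += seen.get(w, 0) + seen.get(2 * w, 0)
--         if w % 2 == 0:
--             answer += seen.get(w // 2, 0) + seen.get(3 * w // 2, 0)
--         if w % 3 == 0:
--             answer += seen.get(2 * w // 3, 0) + seen.get(4 * w // 3, 0)
--         if w % 4 == 0:
--             answer += seen.get(3 * w // 4, 0)
--         seen[w] = seen.get(w, 0) + 1
--     return answer
-- ===== Notes on version B (the rewrite author's own statement) =====
-- stated objective: alternative
-- what changed: Replaces A's preallocated same/visit bucket arrays and the weight*distance coincidence counting (with its sameCnt correction term) by a single running counter dict that is queried at the seven explicit partner weights of each incoming weight.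
-- outside the precondition, e.g. on solution([-1, 1000]): A returns -2, B returns 0; on solution([0, 0]): A returns 13, B returns 7
import Mathlib
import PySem

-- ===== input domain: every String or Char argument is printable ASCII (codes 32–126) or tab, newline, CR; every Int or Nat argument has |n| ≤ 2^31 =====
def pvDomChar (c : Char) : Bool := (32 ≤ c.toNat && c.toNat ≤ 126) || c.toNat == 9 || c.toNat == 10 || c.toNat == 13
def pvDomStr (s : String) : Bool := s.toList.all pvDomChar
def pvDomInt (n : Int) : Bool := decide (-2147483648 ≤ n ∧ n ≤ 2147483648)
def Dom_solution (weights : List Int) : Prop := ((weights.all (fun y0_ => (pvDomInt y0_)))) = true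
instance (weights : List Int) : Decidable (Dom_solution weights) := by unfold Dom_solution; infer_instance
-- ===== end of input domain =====

-- B replaces A's preallocated same/visit bucket arrays (and the weight*distance coincidence counting
-- with its sameCnt correction) by a single running counter dict queried at the seven explicit partner
-- weights of each incoming weight; same one-pass cost, no 5000-slot tables (objective: alternative).

-- ===== PORT A =====
-- loop body of A's 'for idx in range(len(weights))' (st = (same, visit, answer), w = weights[idx])
def stepA (st : List Int × List Int × Int) (w : Int) : List Int × List Int × Int :=
  let same := PySem.List.pySetD st.1 w (PySem.List.pyGetD st.1 w 0 + 1)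
  let answer := st.2.2 + PySem.List.pyGetD same w 0
  let sameCnt := PySem.List.pyGetD same w 0
  (PySem.List.pyRange 2 5 1).foldl
    (fun (st2 : List Int × List Int × Int) dist =>
      let visit := PySem.List.pySetD st2.2.1 (w * dist) (PySem.List.pyGetD st2.2.1 (w * dist) 0 + 1)
      (st2.1, visit, st2.2.2 + (PySem.List.pyGetD visit (w * dist) 0 - sameCnt)))
    (same, st.2.1, answer)

def solution (weights : List Int) : Int :=
  let same := List.replicate 1001 (-1 : Int)
  let visit := List.replicate 4001 (-1 : Int)
  let st := (PySem.List.pyRange 0 (weights.length : Int) 1).foldl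
    (fun st idx => stepA st (PySem.List.pyGetD weights idx 0)) (same, visit, 0)
  st.2.2

-- ===== PORT B =====
-- loop body of B's 'for w in weights' (st = (seen, answer))
def stepB (st : PySem.Dict Int Int × Int) (w : Int) : PySem.Dict Int Int × Int :=
  let seen := st.1
  let a1 := st.2 + (seen.getD w 0 + seen.getD (2 * w) 0)
  let a2 := if PySem.Int.mod w 2 == 0 then
      a1 + (seen.getD (PySem.Int.floordiv w 2) 0 + seen.getD (PySem.Int.floordiv (3 * w) 2) 0)
    else a1
  let a3 := if PySem.Int.mod w 3 == 0 then
      a2 + (seen.getD (PySem.Int.floordiv (2 * w) 3) 0 + seen.getD (PySem.Int.floordiv (4 * w) 3) 0)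
    else a2
  let a4 := if PySem.Int.mod w 4 == 0 then
      a3 + seen.getD (PySem.Int.floordiv (3 * w) 4) 0
    else a3
  (seen.insert w (seen.getD w 0 + 1), a4)

def solution_alt (weights : List Int) : Int :=
  (weights.foldl stepB (PySem.Dict.empty, 0)).2

-- ===== PRECONDITION & SPEC =====
-- okW: a weight A's arrays address without artefacts; okPair: two weights whose array slots stay
-- disjoint under Python's negative-index wraparound (same: slot u and slot v-1001 coincide iff
-- u + 1001 = v; visit: slots u*d1 and v*d2 coincide across signs iff u*d1 + 4001 = v*d2).
def okW (u : Int) : Prop := -1000 ≤ u ∧ u ≤ 1000 ∧ u ≠ 0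
def okPair (u v : Int) : Prop :=
  u + 1001 ≠ v ∧ u * 2 + 4001 ≠ v * 2 ∧ u * 2 + 4001 ≠ v * 3 ∧ u * 2 + 4001 ≠ v * 4 ∧
  u * 3 + 4001 ≠ v * 2 ∧ u * 3 + 4001 ≠ v * 3 ∧ u * 3 + 4001 ≠ v * 4 ∧
  u * 4 + 4001 ≠ v * 2 ∧ u * 4 + 4001 ≠ v * 3 ∧ u * 4 + 4001 ≠ v * 4
-- Pre_ admits every weight list A indexes without artefacts: |w| ≤ 1000 (above 1000 A raises
-- IndexError, below -1000 too), no weight 0 (its three visit slots coincide at index 0, so A's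
-- value there is an artefact of the array encoding), and no pair of weights whose array slots
-- collide through Python's negative-index wraparound (e.g. -1 and 1000 share a same-slot);
-- on all excluded-but-returning inputs A's value is a wraparound artefact B does not reproduce.
def Pre_solution (weights : List Int) : Prop := ∀ u ∈ weights, okW u ∧ ∀ v ∈ weights, okPair u v
instance (weights : List Int) : Decidable (Pre_solution weights) := by unfold Pre_solution okW okPair; infer_instance
def pvWitness_solution : List Int := [100, 200, 300, 150, 100, -100, -200]

def Spec_solution (weights : List Int) (out : Int) : Prop := out = solution_alt weights
instance (weights : List Int) (out : Int) : Decidable (Spec_solution weights out) := by unfold Spec_solution; infer_instance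

-- ===== CLAIM (what is proved, stated in full; the proofs are below) =====
def Claim_equal_solution : Prop := ∀ (weights : List Int), Dom_solution weights → Pre_solution weights → Spec_solution weights (solution weights)

-- ===== LEMMAS AND PROOFS =====

-- B's balance predicate: two weights can sit at distances 2..4 and balance (symmetric form).
def balB (u w : Int) : Bool :=
  u == w || u == 2 * w || w == 2 * u || 2 * u == 3 * w || 2 * w == 3 * u || 3 * u == 4 * w || 3 * w == 4 * u

-- number of already-seen partners of w in prefix p
def C (p : List Int) (w : Int) : Int := (p.countP (fun u => balB u w) : Int)

-- common specification: pair count accumulated left to right (p = already processed prefix)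
def Gs (p : List Int) : List Int → Int
  | [] => 0
  | w :: r => C p w + Gs (p ++ [w]) r

-- A's visit bucket s ∈ [0,4000]: number of (u, dist) pairs with u*dist in slot s (negative
-- products u*dist land in slot u*dist + 4001 by Python's negative-index wraparound)
def Nf (p : List Int) (s : Int) : Int :=
  (p.map (fun u =>
    (if u * 2 = s ∨ u * 2 + 4001 = s then (1 : Int) else 0) +
    (if u * 3 = s ∨ u * 3 + 4001 = s then 1 else 0) +
    (if u * 4 = s ∨ u * 4 + 4001 = s then 1 else 0))).sum

-- a length-n table of f over indices 0..n-1
def tab (n : Nat) (f : Int → Int) : List Int := (List.range n).map (fun i => f ((i : Nat) : Int))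

-- A's same bucket s ∈ [0,1000]: weight s and (negative, wrapped) weight s - 1001 share it
def sameL (p : List Int) : List Int :=
  tab 1001 (fun s => (p.count s : Int) + (p.count (s - 1001) : Int) - 1)
def visitL (p : List Int) : List Int := tab 4001 (fun s => Nf p s - 1)

theorem length_tab (n : Nat) (f : Int → Int) : (tab n f).length = n := by
  simp [tab]

theorem read_tab (n : Nat) (f : Int → Int) (k : Int) (h0 : 0 ≤ k) (h1 : k < (n : Int)) :
    PySem.List.pyGetD (tab n f) k 0 = f k := by
  rw [PySem.List.pyGetD_eq_getElem _ _ h0 (by rw [length_tab]; exact_mod_cast h1)]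
  simp only [tab, List.getElem_map]
  rw [List.getElem_range]
  congr 1
  omega

theorem read_tab_neg (n : Nat) (f : Int → Int) (k : Int) (h0 : -(n : Int) ≤ k) (h1 : k < 0) :
    PySem.List.pyGetD (tab n f) k 0 = f (k + n) := by
  unfold PySem.List.pyGetD PySem.List.pyGet? PySem.List.pyIdx?
  rw [length_tab, if_neg (by omega), if_pos (by omega)]
  have hm : n - (-k).toNat < n := by omega
  simp only [Option.bind_some, tab, List.getElem?_map, List.getElem?_range, hm,
    if_pos hm, Option.map_some, Option.getD_some]
  congr 1
  omega

theorem set_tab_at (n : Nat) (f : Int → Int) (m : Nat) (v : Int) (hm : m < n) :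
    (tab n f).set m v = tab n (Function.update f ((m : Nat) : Int) v) := by
  apply List.ext_getElem
  · simp [tab]
  · intro i hi hi'
    simp only [length_tab, List.length_set] at hi hi'
    simp only [tab, List.getElem_set, List.getElem_map]
    rw [List.getElem_range]
    by_cases h : m = i
    · rw [if_pos h, h, Function.update_self]
    · rw [if_neg h, Function.update_of_ne (by omega)]

theorem set_tab (n : Nat) (f : Int → Int) (k : Int) (v : Int) (h0 : 0 ≤ k) (h1 : k < (n : Int)) :
    PySem.List.pySetD (tab n f) k v = tab n (Function.update f k v) := by
  rw [PySem.List.pySetD_of_nonneg _ _ h0, set_tab_at _ _ _ _ (by omega)]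
  have hk : ((k.toNat : Nat) : Int) = k := by omega
  rw [hk]

theorem set_tab_neg (n : Nat) (f : Int → Int) (k v : Int) (h0 : -(n : Int) ≤ k) (h1 : k < 0) :
    PySem.List.pySetD (tab n f) k v = tab n (Function.update f (k + n) v) := by
  unfold PySem.List.pySetD PySem.List.pySet? PySem.List.pyIdx?
  rw [length_tab, if_neg (by omega), if_pos (by omega)]
  simp only [Option.map_some, Option.getD_some]
  rw [set_tab_at _ _ _ _ (by omega)]
  have hk : ((n - (-k).toNat : Nat) : Int) = k + n := by omega
  rw [hk]

theorem tab_congr (n : Nat) (f g : Int → Int) (h : ∀ k : Int, 0 ≤ k → k < (n : Int) → f k = g k) :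
    tab n f = tab n g := by
  apply List.ext_getElem
  · simp [tab]
  · intro i hi hi'
    simp only [length_tab] at hi hi'
    simp only [tab, List.getElem_map, List.getElem_range]
    exact h i (by positivity) (by exact_mod_cast hi)

-- pointwise facts behind A's inner loop: the nine slot coincidences count 2·[u=w] + [balanced]
set_option maxHeartbeats 1000000 in
theorem pointCore (u w : Int) (hw : w ≠ 0) :
    ((if u * 2 = w * 2 then (1 : Int) else 0) + (if u * 3 = w * 2 then 1 else 0) + (if u * 4 = w * 2 then 1 else 0))
    + ((if u * 2 = w * 3 then (1 : Int) else 0) + (if u * 3 = w * 3 then 1 else 0) + (if u * 4 = w * 3 then 1 else 0))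
    + ((if u * 2 = w * 4 then (1 : Int) else 0) + (if u * 3 = w * 4 then 1 else 0) + (if u * 4 = w * 4 then 1 else 0))
    = 2 * (if u = w then (1 : Int) else 0) + (if balB u w then 1 else 0) := by
  simp only [balB, Bool.or_eq_true, beq_iff_eq,
    show u * 2 = w * 2 ↔ u = w from by omega,
    show u * 3 = w * 2 ↔ 2 * w = 3 * u from by omega,
    show u * 4 = w * 2 ↔ w = 2 * u from by omega,
    show u * 2 = w * 3 ↔ 2 * u = 3 * w from by omega,
    show u * 3 = w * 3 ↔ u = w from by omega,
    show u * 4 = w * 3 ↔ 3 * w = 4 * u from by omega,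
    show u * 2 = w * 4 ↔ u = 2 * w from by omega,
    show u * 3 = w * 4 ↔ 3 * u = 4 * w from by omega,
    show u * 4 = w * 4 ↔ u = w from by omega]
  split_ifs <;> omega

theorem pointA_pos (u w : Int) (hu : okW u) (hw1 : 1 ≤ w) (hw2 : w ≤ 1000)
    (huw : okPair u w) (hwu : okPair w u) :
    ((if u * 2 = w * 2 ∨ u * 2 + 4001 = w * 2 then (1 : Int) else 0) +
     (if u * 3 = w * 2 ∨ u * 3 + 4001 = w * 2 then 1 else 0) +
     (if u * 4 = w * 2 ∨ u * 4 + 4001 = w * 2 then 1 else 0)) +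
    ((if u * 2 = w * 3 ∨ u * 2 + 4001 = w * 3 then (1 : Int) else 0) +
     (if u * 3 = w * 3 ∨ u * 3 + 4001 = w * 3 then 1 else 0) +
     (if u * 4 = w * 3 ∨ u * 4 + 4001 = w * 3 then 1 else 0)) +
    ((if u * 2 = w * 4 ∨ u * 2 + 4001 = w * 4 then (1 : Int) else 0) +
     (if u * 3 = w * 4 ∨ u * 3 + 4001 = w * 4 then 1 else 0) +
     (if u * 4 = w * 4 ∨ u * 4 + 4001 = w * 4 then 1 else 0))
    = 2 * (if u = w then (1 : Int) else 0) + (if balB u w then 1 else 0) := by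
  obtain ⟨c1, c2, c3, c4, c5, c6, c7, c8, c9, c10⟩ := huw
  simp only [show (u * 2 = w * 2 ∨ u * 2 + 4001 = w * 2) ↔ u * 2 = w * 2 from or_iff_left c2,
    show (u * 3 = w * 2 ∨ u * 3 + 4001 = w * 2) ↔ u * 3 = w * 2 from or_iff_left c5,
    show (u * 4 = w * 2 ∨ u * 4 + 4001 = w * 2) ↔ u * 4 = w * 2 from or_iff_left c8,
    show (u * 2 = w * 3 ∨ u * 2 + 4001 = w * 3) ↔ u * 2 = w * 3 from or_iff_left c3,
    show (u * 3 = w * 3 ∨ u * 3 + 4001 = w * 3) ↔ u * 3 = w * 3 from or_iff_left c6,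
    show (u * 4 = w * 3 ∨ u * 4 + 4001 = w * 3) ↔ u * 4 = w * 3 from or_iff_left c9,
    show (u * 2 = w * 4 ∨ u * 2 + 4001 = w * 4) ↔ u * 2 = w * 4 from or_iff_left c4,
    show (u * 3 = w * 4 ∨ u * 3 + 4001 = w * 4) ↔ u * 3 = w * 4 from or_iff_left c7,
    show (u * 4 = w * 4 ∨ u * 4 + 4001 = w * 4) ↔ u * 4 = w * 4 from or_iff_left c10]
  exact pointCore u w (by omega)

theorem pointA_neg (u w : Int) (hu : okW u) (hw1 : -1000 ≤ w) (hw2 : w ≤ -1)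
    (huw : okPair u w) (hwu : okPair w u) :
    ((if u * 2 = w * 2 + 4001 ∨ u * 2 + 4001 = w * 2 + 4001 then (1 : Int) else 0) +
     (if u * 3 = w * 2 + 4001 ∨ u * 3 + 4001 = w * 2 + 4001 then 1 else 0) +
     (if u * 4 = w * 2 + 4001 ∨ u * 4 + 4001 = w * 2 + 4001 then 1 else 0)) +
    ((if u * 2 = w * 3 + 4001 ∨ u * 2 + 4001 = w * 3 + 4001 then (1 : Int) else 0) +
     (if u * 3 = w * 3 + 4001 ∨ u * 3 + 4001 = w * 3 + 4001 then 1 else 0) +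
     (if u * 4 = w * 3 + 4001 ∨ u * 4 + 4001 = w * 3 + 4001 then 1 else 0)) +
    ((if u * 2 = w * 4 + 4001 ∨ u * 2 + 4001 = w * 4 + 4001 then (1 : Int) else 0) +
     (if u * 3 = w * 4 + 4001 ∨ u * 3 + 4001 = w * 4 + 4001 then 1 else 0) +
     (if u * 4 = w * 4 + 4001 ∨ u * 4 + 4001 = w * 4 + 4001 then 1 else 0))
    = 2 * (if u = w then (1 : Int) else 0) + (if balB u w then 1 else 0) := by
  obtain ⟨d1, d2, d3, d4, d5, d6, d7, d8, d9, d10⟩ := hwu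
  simp only [
    show (u * 2 = w * 2 + 4001 ∨ u * 2 + 4001 = w * 2 + 4001) ↔ u * 2 = w * 2 from by omega,
    show (u * 3 = w * 2 + 4001 ∨ u * 3 + 4001 = w * 2 + 4001) ↔ u * 3 = w * 2 from by omega,
    show (u * 4 = w * 2 + 4001 ∨ u * 4 + 4001 = w * 2 + 4001) ↔ u * 4 = w * 2 from by omega,
    show (u * 2 = w * 3 + 4001 ∨ u * 2 + 4001 = w * 3 + 4001) ↔ u * 2 = w * 3 from by omega,
    show (u * 3 = w * 3 + 4001 ∨ u * 3 + 4001 = w * 3 + 4001) ↔ u * 3 = w * 3 from by omega,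
    show (u * 4 = w * 3 + 4001 ∨ u * 4 + 4001 = w * 3 + 4001) ↔ u * 4 = w * 3 from by omega,
    show (u * 2 = w * 4 + 4001 ∨ u * 2 + 4001 = w * 4 + 4001) ↔ u * 2 = w * 4 from by omega,
    show (u * 3 = w * 4 + 4001 ∨ u * 3 + 4001 = w * 4 + 4001) ↔ u * 3 = w * 4 from by omega,
    show (u * 4 = w * 4 + 4001 ∨ u * 4 + 4001 = w * 4 + 4001) ↔ u * 4 = w * 4 from by omega]
  exact pointCore u w (by omega)

theorem Nf_cons (u : Int) (p : List Int) (s : Int) :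
    Nf (u :: p) s = ((if u * 2 = s ∨ u * 2 + 4001 = s then (1 : Int) else 0) +
      (if u * 3 = s ∨ u * 3 + 4001 = s then 1 else 0) +
      (if u * 4 = s ∨ u * 4 + 4001 = s then 1 else 0)) + Nf p s := by
  simp [Nf]

theorem Nf_append (p : List Int) (w s : Int) :
    Nf (p ++ [w]) s = Nf p s + ((if w * 2 = s ∨ w * 2 + 4001 = s then (1 : Int) else 0) +
      (if w * 3 = s ∨ w * 3 + 4001 = s then 1 else 0) +
      (if w * 4 = s ∨ w * 4 + 4001 = s then 1 else 0)) := by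
  simp [Nf]

theorem count_cons_int (u : Int) (p : List Int) (v : Int) :
    ((u :: p).count v : Int) = (if u = v then (1 : Int) else 0) + (p.count v : Int) := by
  by_cases h : u = v <;> simp [List.count_cons, h] <;> push_cast <;> ring

theorem countP_cons_bal (u : Int) (p : List Int) (w : Int) :
    C (u :: p) w = (if balB u w then (1 : Int) else 0) + C p w := by
  by_cases h : balB u w <;> simp [C, List.countP_cons, h] <;> push_cast <;> ring

theorem NfC_pos (p : List Int) (w : Int) (hw1 : 1 ≤ w) (hw2 : w ≤ 1000)
    (hp : ∀ u ∈ p, okW u ∧ okPair u w ∧ okPair w u) :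
    Nf p (w * 2) + Nf p (w * 3) + Nf p (w * 4) = 2 * (p.count w : Int) + C p w := by
  induction p with
  | nil => simp [Nf, C]
  | cons u p ih =>
    obtain ⟨hu, huw, hwu⟩ := hp u (by simp)
    rw [Nf_cons, Nf_cons, Nf_cons, count_cons_int, countP_cons_bal]
    have hrest := ih (fun x hx => hp x (by simp [hx]))
    have := pointA_pos u w hu hw1 hw2 huw hwu
    omega

theorem NfC_neg (p : List Int) (w : Int) (hw1 : -1000 ≤ w) (hw2 : w ≤ -1)
    (hp : ∀ u ∈ p, okW u ∧ okPair u w ∧ okPair w u) :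
    Nf p (w * 2 + 4001) + Nf p (w * 3 + 4001) + Nf p (w * 4 + 4001)
      = 2 * (p.count w : Int) + C p w := by
  induction p with
  | nil => simp [Nf, C]
  | cons u p ih =>
    obtain ⟨hu, huw, hwu⟩ := hp u (by simp)
    rw [Nf_cons, Nf_cons, Nf_cons, count_cons_int, countP_cons_bal]
    have hrest := ih (fun x hx => hp x (by simp [hx]))
    have := pointA_neg u w hu hw1 hw2 huw hwu
    omega

-- counts over an appended element
theorem count_append_singleton (p : List Int) (w v : Int) :
    ((p ++ [w]).count v : Int) = (p.count v : Int) + (if w = v then 1 else 0) := by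
  by_cases h : w = v <;> simp [List.count_append, h] <;> push_cast <;> ring

-- ===== A-side step =====

theorem stepA_spec (p : List Int) (a : Int) (w : Int) (hw : okW w)
    (hp : ∀ u ∈ p, okW u ∧ okPair u w ∧ okPair w u) :
    stepA (sameL p, visitL p, a) w = (sameL (p ++ [w]), visitL (p ++ [w]), a + C p w) := by
  obtain ⟨hwl, hwr, hw0⟩ := hw
  have hr : PySem.List.pyRange 2 5 1 = [2, 3, 4] := by decide
  have hcm : (p.count (w - 1001) : Int) = 0 := by
    have hnm : (w - 1001) ∉ p := fun hmem => by have h := (hp _ hmem).2.1.1; omega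
    simp [List.count_eq_zero.mpr hnm]
  have hcp : (p.count (w + 1001) : Int) = 0 := by
    have hnm : (w + 1001) ∉ p := fun hmem => by have h := (hp _ hmem).2.2.1; omega
    simp [List.count_eq_zero.mpr hnm]
  by_cases hneg : w < 0
  · -- negative weight: every index wraps around
    have r0 : PySem.List.pyGetD (sameL p) w 0 = (p.count w : Int) - 1 := by
      unfold sameL
      rw [read_tab_neg _ _ _ (by omega) (by omega)]
      push_cast
      rw [show w + (1001 : Int) - 1001 = w from by ring, hcp]
      ring
    have hset : PySem.List.pySetD (sameL p) w (PySem.List.pyGetD (sameL p) w 0 + 1) = sameL (p ++ [w]) := by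
      rw [r0]
      unfold sameL
      rw [set_tab_neg _ _ _ _ (by omega) (by omega)]
      have hpt : w + ((1001 : Nat) : Int) = w + 1001 := by norm_num
      rw [hpt]
      apply tab_congr
      intro s hs0 hs1
      rw [count_append_singleton, count_append_singleton]
      by_cases h : s = w + 1001
      · subst h
        rw [Function.update_self, show w + 1001 - 1001 = w from by ring]
        split_ifs <;> omega
      · rw [Function.update_of_ne h]; split_ifs <;> omega
    have rsame : PySem.List.pyGetD (sameL (p ++ [w])) w 0 = (p.count w : Int) := by
      unfold sameL
      rw [read_tab_neg _ _ _ (by omega) (by omega)]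
      push_cast
      rw [show w + (1001 : Int) - 1001 = w from by ring, count_append_singleton, count_append_singleton]
      split_ifs <;> omega
    have rv1 : PySem.List.pyGetD (visitL p) (w * 2) 0 = Nf p (w * 2 + 4001) - 1 := by
      unfold visitL
      rw [read_tab_neg _ _ _ (by omega) (by omega)]
      push_cast
      ring_nf
    have sv1 : PySem.List.pySetD (visitL p) (w * 2) (PySem.List.pyGetD (visitL p) (w * 2) 0 + 1)
        = tab 4001 (Function.update (fun s => Nf p s - 1) (w * 2 + 4001) (Nf p (w * 2 + 4001))) := by
      rw [rv1]
      unfold visitL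
      rw [set_tab_neg _ _ _ _ (by omega) (by omega), sub_add_cancel]
      norm_num
    have rv1' : PySem.List.pyGetD (tab 4001 (Function.update (fun s => Nf p s - 1) (w * 2 + 4001) (Nf p (w * 2 + 4001)))) (w * 2) 0
        = Nf p (w * 2 + 4001) := by
      rw [read_tab_neg _ _ _ (by omega) (by omega)]
      push_cast
      rw [Function.update_self]
    have rv2 : PySem.List.pyGetD (tab 4001 (Function.update (fun s => Nf p s - 1) (w * 2 + 4001) (Nf p (w * 2 + 4001)))) (w * 3) 0
        = Nf p (w * 3 + 4001) - 1 := by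
      rw [read_tab_neg _ _ _ (by omega) (by omega)]
      push_cast
      rw [Function.update_of_ne (by omega)]
    have sv2 : PySem.List.pySetD (tab 4001 (Function.update (fun s => Nf p s - 1) (w * 2 + 4001) (Nf p (w * 2 + 4001)))) (w * 3)
          (Nf p (w * 3 + 4001) - 1 + 1)
        = tab 4001 (Function.update (Function.update (fun s => Nf p s - 1) (w * 2 + 4001) (Nf p (w * 2 + 4001))) (w * 3 + 4001) (Nf p (w * 3 + 4001))) := by
      rw [set_tab_neg _ _ _ _ (by omega) (by omega), sub_add_cancel]
      norm_num
    have rv2' : PySem.List.pyGetD (tab 4001 (Function.update (Function.update (fun s => Nf p s - 1) (w * 2 + 4001) (Nf p (w * 2 + 4001))) (w * 3 + 4001) (Nf p (w * 3 + 4001)))) (w * 3) 0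
        = Nf p (w * 3 + 4001) := by
      rw [read_tab_neg _ _ _ (by omega) (by omega)]
      push_cast
      rw [Function.update_self]
    have rv3 : PySem.List.pyGetD (tab 4001 (Function.update (Function.update (fun s => Nf p s - 1) (w * 2 + 4001) (Nf p (w * 2 + 4001))) (w * 3 + 4001) (Nf p (w * 3 + 4001)))) (w * 4) 0
        = Nf p (w * 4 + 4001) - 1 := by
      rw [read_tab_neg _ _ _ (by omega) (by omega)]
      push_cast
      rw [Function.update_of_ne (by omega), Function.update_of_ne (by omega)]
    have sv3 : PySem.List.pySetD (tab 4001 (Function.update (Function.update (fun s => Nf p s - 1) (w * 2 + 4001) (Nf p (w * 2 + 4001))) (w * 3 + 4001) (Nf p (w * 3 + 4001)))) (w * 4)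
          (Nf p (w * 4 + 4001) - 1 + 1)
        = tab 4001 (Function.update (Function.update (Function.update (fun s => Nf p s - 1) (w * 2 + 4001) (Nf p (w * 2 + 4001))) (w * 3 + 4001) (Nf p (w * 3 + 4001))) (w * 4 + 4001) (Nf p (w * 4 + 4001))) := by
      rw [set_tab_neg _ _ _ _ (by omega) (by omega), sub_add_cancel]
      norm_num
    have rv3' : PySem.List.pyGetD (tab 4001 (Function.update (Function.update (Function.update (fun s => Nf p s - 1) (w * 2 + 4001) (Nf p (w * 2 + 4001))) (w * 3 + 4001) (Nf p (w * 3 + 4001))) (w * 4 + 4001) (Nf p (w * 4 + 4001)))) (w * 4) 0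
        = Nf p (w * 4 + 4001) := by
      rw [read_tab_neg _ _ _ (by omega) (by omega)]
      push_cast
      rw [Function.update_self]
    have hvfin : tab 4001 (Function.update (Function.update (Function.update (fun s => Nf p s - 1) (w * 2 + 4001) (Nf p (w * 2 + 4001))) (w * 3 + 4001) (Nf p (w * 3 + 4001))) (w * 4 + 4001) (Nf p (w * 4 + 4001)))
        = visitL (p ++ [w]) := by
      unfold visitL
      apply tab_congr
      intro s hs0 hs1
      rw [Nf_append]
      by_cases h4 : s = w * 4 + 4001
      · subst h4; rw [Function.update_self]; split_ifs <;> omega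
      · rw [Function.update_of_ne h4]
        by_cases h3 : s = w * 3 + 4001
        · subst h3; rw [Function.update_self]; split_ifs <;> omega
        · rw [Function.update_of_ne h3]
          by_cases h2 : s = w * 2 + 4001
          · subst h2; rw [Function.update_self]; split_ifs <;> omega
          · rw [Function.update_of_ne h2]; split_ifs <;> omega
    have hNfC := NfC_neg p w (by omega) (by omega) hp
    simp only [stepA, hr, List.foldl_cons, List.foldl_nil]
    rw [hset, rsame, sv1, rv1', rv2, sv2, rv2', rv3, sv3, rv3', hvfin]
    rw [Prod.mk.injEq, Prod.mk.injEq]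
    exact ⟨rfl, rfl, by omega⟩
  · -- nonnegative (hence ≥ 1) weight: plain indices
    have r0 : PySem.List.pyGetD (sameL p) w 0 = (p.count w : Int) - 1 := by
      unfold sameL
      rw [read_tab _ _ _ (by omega) (by omega), hcm]
      ring
    have hset : PySem.List.pySetD (sameL p) w (PySem.List.pyGetD (sameL p) w 0 + 1) = sameL (p ++ [w]) := by
      rw [r0]
      unfold sameL
      rw [set_tab _ _ _ _ (by omega) (by omega)]
      apply tab_congr
      intro s hs0 hs1
      rw [count_append_singleton, count_append_singleton]
      by_cases h : s = w
      · subst h; rw [Function.update_self]; split_ifs <;> omega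
      · rw [Function.update_of_ne h]; split_ifs <;> omega
    have rsame : PySem.List.pyGetD (sameL (p ++ [w])) w 0 = (p.count w : Int) := by
      unfold sameL
      rw [read_tab _ _ _ (by omega) (by omega), count_append_singleton, count_append_singleton]
      split_ifs <;> omega
    have rv1 : PySem.List.pyGetD (visitL p) (w * 2) 0 = Nf p (w * 2) - 1 := by
      unfold visitL
      exact read_tab _ _ _ (by omega) (by omega)
    have sv1 : PySem.List.pySetD (visitL p) (w * 2) (PySem.List.pyGetD (visitL p) (w * 2) 0 + 1)
        = tab 4001 (Function.update (fun s => Nf p s - 1) (w * 2) (Nf p (w * 2))) := by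
      rw [rv1]
      unfold visitL
      rw [set_tab _ _ _ _ (by omega) (by omega), sub_add_cancel]
    have rv1' : PySem.List.pyGetD (tab 4001 (Function.update (fun s => Nf p s - 1) (w * 2) (Nf p (w * 2)))) (w * 2) 0
        = Nf p (w * 2) := by
      rw [read_tab _ _ _ (by omega) (by omega), Function.update_self]
    have rv2 : PySem.List.pyGetD (tab 4001 (Function.update (fun s => Nf p s - 1) (w * 2) (Nf p (w * 2)))) (w * 3) 0
        = Nf p (w * 3) - 1 := by
      rw [read_tab _ _ _ (by omega) (by omega), Function.update_of_ne (by omega)]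
    have sv2 : PySem.List.pySetD (tab 4001 (Function.update (fun s => Nf p s - 1) (w * 2) (Nf p (w * 2)))) (w * 3)
          (Nf p (w * 3) - 1 + 1)
        = tab 4001 (Function.update (Function.update (fun s => Nf p s - 1) (w * 2) (Nf p (w * 2))) (w * 3) (Nf p (w * 3))) := by
      rw [set_tab _ _ _ _ (by omega) (by omega), sub_add_cancel]
    have rv2' : PySem.List.pyGetD (tab 4001 (Function.update (Function.update (fun s => Nf p s - 1) (w * 2) (Nf p (w * 2))) (w * 3) (Nf p (w * 3)))) (w * 3) 0
        = Nf p (w * 3) := by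
      rw [read_tab _ _ _ (by omega) (by omega), Function.update_self]
    have rv3 : PySem.List.pyGetD (tab 4001 (Function.update (Function.update (fun s => Nf p s - 1) (w * 2) (Nf p (w * 2))) (w * 3) (Nf p (w * 3)))) (w * 4) 0
        = Nf p (w * 4) - 1 := by
      rw [read_tab _ _ _ (by omega) (by omega), Function.update_of_ne (by omega), Function.update_of_ne (by omega)]
    have sv3 : PySem.List.pySetD (tab 4001 (Function.update (Function.update (fun s => Nf p s - 1) (w * 2) (Nf p (w * 2))) (w * 3) (Nf p (w * 3)))) (w * 4)
          (Nf p (w * 4) - 1 + 1)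
        = tab 4001 (Function.update (Function.update (Function.update (fun s => Nf p s - 1) (w * 2) (Nf p (w * 2))) (w * 3) (Nf p (w * 3))) (w * 4) (Nf p (w * 4))) := by
      rw [set_tab _ _ _ _ (by omega) (by omega), sub_add_cancel]
    have rv3' : PySem.List.pyGetD (tab 4001 (Function.update (Function.update (Function.update (fun s => Nf p s - 1) (w * 2) (Nf p (w * 2))) (w * 3) (Nf p (w * 3))) (w * 4) (Nf p (w * 4)))) (w * 4) 0
        = Nf p (w * 4) := by
      rw [read_tab _ _ _ (by omega) (by omega), Function.update_self]
    have hvfin : tab 4001 (Function.update (Function.update (Function.update (fun s => Nf p s - 1) (w * 2) (Nf p (w * 2))) (w * 3) (Nf p (w * 3))) (w * 4) (Nf p (w * 4)))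
        = visitL (p ++ [w]) := by
      unfold visitL
      apply tab_congr
      intro s hs0 hs1
      rw [Nf_append]
      by_cases h4 : s = w * 4
      · subst h4; rw [Function.update_self]; split_ifs <;> omega
      · rw [Function.update_of_ne h4]
        by_cases h3 : s = w * 3
        · subst h3; rw [Function.update_self]; split_ifs <;> omega
        · rw [Function.update_of_ne h3]
          by_cases h2 : s = w * 2
          · subst h2; rw [Function.update_self]; split_ifs <;> omega
          · rw [Function.update_of_ne h2]; split_ifs <;> omega
    have hNfC := NfC_pos p w (by omega) (by omega) hp
    simp only [stepA, hr, List.foldl_cons, List.foldl_nil]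
    rw [hset, rsame, sv1, rv1', rv2, sv2, rv2', rv3, sv3, rv3', hvfin]
    rw [Prod.mk.injEq, Prod.mk.injEq]
    exact ⟨rfl, rfl, by omega⟩

theorem foldA (ws : List Int) : ∀ (p : List Int) (a : Int),
    (∀ u ∈ p ++ ws, okW u) → (∀ u ∈ p ++ ws, ∀ v ∈ p ++ ws, okPair u v) →
    (ws.foldl stepA (sameL p, visitL p, a)).2.2 = a + Gs p ws := by
  induction ws with
  | nil => intro p a _ _; simp [Gs]
  | cons w r ih =>
    intro p a hall hpair
    have hwmem : w ∈ p ++ w :: r := by simp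
    have hp : ∀ u ∈ p, okW u ∧ okPair u w ∧ okPair w u := fun u hu =>
      ⟨hall u (by simp [hu]), hpair u (by simp [hu]) w hwmem, hpair w hwmem u (by simp [hu])⟩
    rw [List.foldl_cons, stepA_spec p a w (hall w hwmem) hp, Gs]
    have hmem : ∀ x : Int, x ∈ (p ++ [w]) ++ r ↔ x ∈ p ++ w :: r := by
      intro x
      constructor <;> (intro hx <;> simp [List.mem_append] at hx ⊢ <;> tauto)
    rw [ih (p ++ [w]) (a + C p w) (fun u hu => hall u ((hmem u).mp hu))
      (fun u hu v hv => hpair u ((hmem u).mp hu) v ((hmem v).mp hv))]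
    ring

theorem A_eq_Gs (ws : List Int) (h : Pre_solution ws) :
    solution ws = Gs [] ws := by
  show (List.foldl (fun st idx => stepA st (PySem.List.pyGetD ws idx 0))
      (List.replicate 1001 (-1 : Int), List.replicate 4001 (-1 : Int), 0)
      (PySem.List.pyRange 0 (ws.length : Int) 1)).2.2 = Gs [] ws
  rw [PySem.List.foldl_pyRange_zero_pyGetD' ws 0 stepA _]
  have hsame : List.replicate 1001 (-1 : Int) = sameL [] := by
    unfold sameL
    rw [show (fun s : Int => (([] : List Int).count s : Int) + (([] : List Int).count (s - 1001) : Int) - 1)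
        = fun _ : Int => (-1 : Int) from funext (fun s => by simp)]
    simp [tab, List.map_const']
  have hvisit : List.replicate 4001 (-1 : Int) = visitL [] := by
    unfold visitL
    rw [show (fun s : Int => Nf [] s - 1) = fun _ : Int => (-1 : Int) from funext (fun s => by simp [Nf])]
    simp [tab, List.map_const']
  rw [hsame, hvisit,
    foldA ws [] 0 (fun u hu => (h u (by simpa using hu)).1)
      (fun u hu v hv => (h u (by simpa using hu)).2 v (by simpa using hv))]
  ring

-- ===== B-side step =====

-- pointwise facts behind B's seven lookups
set_option maxHeartbeats 1000000 in
theorem balB_sum (u w : Int) (hw : w ≠ 0) :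
    (if balB u w then (1 : Int) else 0)
    = (if u = w then (1 : Int) else 0) + (if u = 2 * w then 1 else 0) + (if w = 2 * u then 1 else 0)
      + (if 2 * u = 3 * w then 1 else 0) + (if 2 * w = 3 * u then 1 else 0)
      + (if 3 * u = 4 * w then 1 else 0) + (if 3 * w = 4 * u then 1 else 0) := by
  simp only [balB, Bool.or_eq_true, beq_iff_eq]
  split_ifs <;> omega

theorem g2 (u w : Int) :
    (if PySem.Int.mod w 2 = 0 then
        (if u = PySem.Int.floordiv w 2 then (1 : Int) else 0) + (if u = PySem.Int.floordiv (3 * w) 2 then 1 else 0) else 0)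
    = (if w = 2 * u then (1 : Int) else 0) + (if 2 * u = 3 * w then 1 else 0) := by
  have e1 := PySem.Int.floordiv_mul_add_mod w 2
  have e2 := PySem.Int.floordiv_mul_add_mod (3 * w) 2
  have b1 := PySem.Int.mod_nonneg w (b := 2) (by omega)
  have b1' := PySem.Int.mod_lt w (b := 2) (by omega)
  have b2 := PySem.Int.mod_nonneg (3 * w) (b := 2) (by omega)
  have b2' := PySem.Int.mod_lt (3 * w) (b := 2) (by omega)
  by_cases h2 : PySem.Int.mod w 2 = 0
  · rw [if_pos h2]
    simp only [show (u = PySem.Int.floordiv w 2) ↔ w = 2 * u from by omega,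
      show (u = PySem.Int.floordiv (3 * w) 2) ↔ 2 * u = 3 * w from by omega]
  · rw [if_neg h2, if_neg (show ¬ w = 2 * u from by omega),
      if_neg (show ¬ 2 * u = 3 * w from by omega)]
    ring

theorem g3 (u w : Int) :
    (if PySem.Int.mod w 3 = 0 then
        (if u = PySem.Int.floordiv (2 * w) 3 then (1 : Int) else 0) + (if u = PySem.Int.floordiv (4 * w) 3 then 1 else 0) else 0)
    = (if 2 * w = 3 * u then (1 : Int) else 0) + (if 3 * u = 4 * w then 1 else 0) := by
  have e1 := PySem.Int.floordiv_mul_add_mod w 3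
  have e3 := PySem.Int.floordiv_mul_add_mod (2 * w) 3
  have e4 := PySem.Int.floordiv_mul_add_mod (4 * w) 3
  have b1 := PySem.Int.mod_nonneg w (b := 3) (by omega)
  have b1' := PySem.Int.mod_lt w (b := 3) (by omega)
  have b3 := PySem.Int.mod_nonneg (2 * w) (b := 3) (by omega)
  have b3' := PySem.Int.mod_lt (2 * w) (b := 3) (by omega)
  have b4 := PySem.Int.mod_nonneg (4 * w) (b := 3) (by omega)
  have b4' := PySem.Int.mod_lt (4 * w) (b := 3) (by omega)
  by_cases h3 : PySem.Int.mod w 3 = 0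
  · rw [if_pos h3]
    simp only [show (u = PySem.Int.floordiv (2 * w) 3) ↔ 2 * w = 3 * u from by omega,
      show (u = PySem.Int.floordiv (4 * w) 3) ↔ 3 * u = 4 * w from by omega]
  · rw [if_neg h3, if_neg (show ¬ 2 * w = 3 * u from by omega),
      if_neg (show ¬ 3 * u = 4 * w from by omega)]
    ring

theorem g4 (u w : Int) :
    (if PySem.Int.mod w 4 = 0 then
        (if u = PySem.Int.floordiv (3 * w) 4 then (1 : Int) else 0) else 0)
    = (if 3 * w = 4 * u then (1 : Int) else 0) := by
  have e1 := PySem.Int.floordiv_mul_add_mod w 4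
  have e5 := PySem.Int.floordiv_mul_add_mod (3 * w) 4
  have b1 := PySem.Int.mod_nonneg w (b := 4) (by omega)
  have b1' := PySem.Int.mod_lt w (b := 4) (by omega)
  have b5 := PySem.Int.mod_nonneg (3 * w) (b := 4) (by omega)
  have b5' := PySem.Int.mod_lt (3 * w) (b := 4) (by omega)
  by_cases h4 : PySem.Int.mod w 4 = 0
  · rw [if_pos h4]
    simp only [show (u = PySem.Int.floordiv (3 * w) 4) ↔ 3 * w = 4 * u from by omega]
  · rw [if_neg h4, if_neg (show ¬ 3 * w = 4 * u from by omega)]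

theorem pointB (u w : Int) (hw : w ≠ 0) :
    (if u = w then (1 : Int) else 0) + (if u = 2 * w then 1 else 0)
    + (if PySem.Int.mod w 2 = 0 then
        (if u = PySem.Int.floordiv w 2 then (1 : Int) else 0) + (if u = PySem.Int.floordiv (3 * w) 2 then 1 else 0) else 0)
    + (if PySem.Int.mod w 3 = 0 then
        (if u = PySem.Int.floordiv (2 * w) 3 then (1 : Int) else 0) + (if u = PySem.Int.floordiv (4 * w) 3 then 1 else 0) else 0)
    + (if PySem.Int.mod w 4 = 0 then
        (if u = PySem.Int.floordiv (3 * w) 4 then (1 : Int) else 0) else 0)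
    = (if balB u w then 1 else 0) := by
  rw [balB_sum u w hw, g2, g3, g4]
  ring

set_option maxHeartbeats 1000000 in
theorem B_reads (p : List Int) (w : Int) (hw : w ≠ 0) :
    ((p.count w : Int) + (p.count (2 * w) : Int))
    + (if PySem.Int.mod w 2 = 0 then
        ((p.count (PySem.Int.floordiv w 2) : Int) + (p.count (PySem.Int.floordiv (3 * w) 2) : Int)) else 0)
    + (if PySem.Int.mod w 3 = 0 then
        ((p.count (PySem.Int.floordiv (2 * w) 3) : Int) + (p.count (PySem.Int.floordiv (4 * w) 3) : Int)) else 0)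
    + (if PySem.Int.mod w 4 = 0 then
        (p.count (PySem.Int.floordiv (3 * w) 4) : Int) else 0)
    = C p w := by
  induction p with
  | nil => simp [C]
  | cons u p ih =>
    rw [count_cons_int u p w, count_cons_int u p (2 * w), count_cons_int u p (PySem.Int.floordiv w 2),
      count_cons_int u p (PySem.Int.floordiv (3 * w) 2), count_cons_int u p (PySem.Int.floordiv (2 * w) 3),
      count_cons_int u p (PySem.Int.floordiv (4 * w) 3), count_cons_int u p (PySem.Int.floordiv (3 * w) 4),
      countP_cons_bal]
    have hpt := pointB u w hw
    by_cases h2 : PySem.Int.mod w 2 = 0 <;> by_cases h3 : PySem.Int.mod w 3 = 0 <;>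
      by_cases h4 : PySem.Int.mod w 4 = 0 <;>
      simp only [h2, h3, h4, if_true, if_false] at hpt ih ⊢ <;> omega

theorem stepB_spec (p : List Int) (d : PySem.Dict Int Int) (a : Int) (w : Int) (hw : w ≠ 0)
    (hd : ∀ v : Int, d.getD v 0 = (p.count v : Int)) :
    stepB (d, a) w = (d.insert w (d.getD w 0 + 1), a + C p w) ∧
      (∀ v : Int, (d.insert w (d.getD w 0 + 1)).getD v 0 = ((p ++ [w]).count v : Int)) := by
  constructor
  · simp only [stepB, beq_iff_eq, hd]
    rw [Prod.mk.injEq]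
    refine ⟨rfl, ?_⟩
    rw [← B_reads p w hw]
    split_ifs <;> ring
  · intro v
    rw [PySem.Dict.getD_insert, count_append_singleton, hd w, hd v]
    by_cases h : v = w
    · subst h; simp
    · simp [h, Ne.symm h]

theorem foldB (ws : List Int) : ∀ (p : List Int) (d : PySem.Dict Int Int) (a : Int),
    (∀ w ∈ ws, w ≠ 0) →
    (∀ v : Int, d.getD v 0 = (p.count v : Int)) →
    (ws.foldl stepB (d, a)).2 = a + Gs p ws := by
  induction ws with
  | nil => intro p d a _ _; simp [Gs]
  | cons w r ih =>
    intro p d a h hd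
    have hw := h w (by simp)
    obtain ⟨hstep, hd'⟩ := stepB_spec p d a w hw hd
    rw [List.foldl_cons, hstep, Gs]
    rw [ih (p ++ [w]) _ (a + C p w) (fun x hx => h x (by simp [hx])) hd']
    ring

theorem B_eq_Gs (ws : List Int) (h : Pre_solution ws) :
    solution_alt ws = Gs [] ws := by
  unfold solution_alt
  rw [foldB ws [] PySem.Dict.empty 0 (fun w hw => (h w hw).1.2.2)
    (fun v => by simp [PySem.Dict.getD_empty])]
  ring

-- ===== VERDICT (by name: the statement is the Claim_ definition above) =====
theorem solution_spec : Claim_equal_solution := by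
  intro ws _ hpre
  unfold Spec_solution
  rw [A_eq_Gs ws hpre, B_eq_Gs ws hpre]
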